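-- pv_equiv track=rewrite | github.com/fxaleman03-coder/IFA_AJAKO | scripts/fix_baba_ejiogbe_structure.py | split_ranges
-- ===== SOURCE A (Python) =====
-- from typing import Dict, List, Optional, Tuple
--
-- SECTION_ORDER = [
--     "REZO",
--     "SUYERE",
--     "NACE",
--     "DESCRIPCION",
--     "OBRAS",
--     "DICE_IFA",
--     "EWES",
--     "REFRANES",
--     "ESHU",
--     "HISTORIAS",
-- ]
--
-- def split_ranges(starts: Dict[str, int], total: int) -> Dict[str, Tuple[int, int]]:
--     ranges: Dict[str, Tuple[int, int]] = {}
--     present = [s for s in SECTION_ORDER if s in starts]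
--     for i, section in enumerate(present):
--         start = starts[section]
--         if i + 1 < len(present):
--             end = starts[present[i + 1]]
--         else:
--             end = total
--         ranges[section] = (start, end)
--     return ranges
-- ===== SOURCE B (Python) =====
-- SECTION_ORDER = [
--     "REZO",
--     "SUYERE",
--     "NACE",
--     "DESCRIPCION",
--     "OBRAS",
--     "DICE_IFA",
--     "EWES",
--     "REFRANES",
--     "ESHU",
--     "HISTORIAS",
-- ]
--
-- def split_ranges(starts, total):
--     # Backward pass: carry the right boundary instead of looking ahead by index.
--     pairs = []
--     next_start = total
--     for section in reversed(SECTION_ORDER):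
--         if section in starts:
--             v = starts[section]
--             pairs.append((section, (v, next_start)))
--             next_start = v
--     return dict(reversed(pairs))
-- ===== Notes on version B (the rewrite author's own statement) =====
-- stated objective: alternative
-- what changed: Replaces the forward enumerate loop with index-based lookahead (present[i+1]) by a single backward pass over SECTION_ORDER that carries the right boundary in an accumulator, fusing the membership filter into the loop.
import Mathlib
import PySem

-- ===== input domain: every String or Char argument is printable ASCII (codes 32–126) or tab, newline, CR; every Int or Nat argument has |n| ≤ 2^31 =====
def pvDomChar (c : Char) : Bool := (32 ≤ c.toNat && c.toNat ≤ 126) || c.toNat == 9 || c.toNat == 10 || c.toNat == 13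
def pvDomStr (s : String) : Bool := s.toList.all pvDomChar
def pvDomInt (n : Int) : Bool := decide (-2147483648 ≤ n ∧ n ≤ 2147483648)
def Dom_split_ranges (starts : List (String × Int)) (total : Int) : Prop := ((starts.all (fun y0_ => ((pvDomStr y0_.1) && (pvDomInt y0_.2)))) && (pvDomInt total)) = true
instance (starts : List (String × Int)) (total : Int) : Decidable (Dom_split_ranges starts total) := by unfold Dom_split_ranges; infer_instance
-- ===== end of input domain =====

-- B replaces A's forward enumerate loop with index lookahead by a backward pass carrying the right boundary; return values are proved equal.

def SECTION_ORDER : List String :=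
  ["REZO", "SUYERE", "NACE", "DESCRIPCION", "OBRAS", "DICE_IFA", "EWES", "REFRANES", "ESHU", "HISTORIAS"]

-- ===== PORT A =====
-- literal port of A: present = filter, then enumerate loop with present[i+1] lookahead.
def split_ranges (starts : List (String × Int)) (total : Int) : List (String × Int × Int) :=
  let d : PySem.Dict String Int := PySem.Dict.mk starts
  let present := SECTION_ORDER.filter (fun s => d.contains s)
  let ranges : PySem.Dict String (Int × Int) :=
    (PySem.List.enumerate present).foldl
      (fun ranges p =>
        let start := d.getD p.2 0  -- key present (filter guarantees it): Python's starts[sec] never raises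
        let e : Int :=
          if p.1 + 1 < (present.length : Int) then
            d.getD (PySem.List.pyGetD present (p.1 + 1) "") 0  -- present[i+1] in range here
          else total
        ranges.insert p.2 (start, e))
      (PySem.Dict.mk [])
  ranges.items

-- ===== PORT B =====
-- literal port of Source B: backward pass over SECTION_ORDER carrying next_start, then dict(reversed(pairs)).
def split_ranges_alt (starts : List (String × Int)) (total : Int) : List (String × Int × Int) :=
  let d : PySem.Dict String Int := PySem.Dict.mk starts
  let acc :=
    SECTION_ORDER.reverse.foldl
      (fun (acc : List (String × Int × Int) × Int) sec =>
        if d.contains sec then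
          let v := d.getD sec 0
          (acc.1 ++ [(sec, v, acc.2)], v)
        else acc)
      ([], total)
  (PySem.Dict.ofList acc.1.reverse).items

-- ===== PRECONDITION & SPEC =====
def Spec_split_ranges (starts : List (String × Int)) (total : Int) (out : List (String × Int × Int)) : Prop := out = split_ranges_alt starts total
instance (starts : List (String × Int)) (total : Int) (out : List (String × Int × Int)) : Decidable (Spec_split_ranges starts total out) := by unfold Spec_split_ranges; infer_instance

-- ===== CLAIM (what is proved, stated in full; the proofs are below) =====
def Claim_equal_split_ranges : Prop := ∀ (starts : List (String × Int)) (total : Int), Dom_split_ranges starts total → Spec_split_ranges starts total (split_ranges starts total)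

-- ===== LEMMAS AND PROOFS =====

-- the common value both ports compute: successive (sec, start, next-start-or-total) triples
def zipNext (get : String → Int) : List String → Int → List (String × Int × Int)
  | [], _ => []
  | [s], total => [(s, get s, total)]
  | s :: t :: rest, total => (s, get s, get t) :: zipNext get (t :: rest) total

def nextOf (get : String → Int) (l : List String) (total : Int) : Int :=
  match l with
  | [] => total
  | t :: _ => get t

theorem zipNext_cons (get : String → Int) (s : String) (rest : List String) (total : Int) :
    zipNext get (s :: rest) total = (s, get s, nextOf get rest total) :: zipNext get rest total := by
  cases rest <;> rfl

theorem zipNext_keys (get : String → Int) (l : List String) (total : Int) :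
    (zipNext get l total).map Prod.fst = l := by
  induction l with
  | nil => rfl
  | cons s rest ih => rw [zipNext_cons]; simpa using ih

-- B's backward accumulation characterised
theorem b_core (get : String → Int) (l : List String) (total : Int) :
    l.foldr (fun s (acc : List (String × Int × Int) × Int) => (acc.1 ++ [(s, get s, acc.2)], get s)) ([], total)
      = ((zipNext get l total).reverse, nextOf get l total) := by
  induction l with
  | nil => rfl
  | cons s rest ih =>
    simp only [List.foldr_cons, ih, zipNext_cons, nextOf, List.reverse_cons]

-- A's mapped form equals zipNext (suffix induction)
theorem a_core (get : String → Int) (pre suf : List String) (total : Int) :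
    (PySem.List.enumerate suf (pre.length : Int)).map
      (fun p => (p.2, get p.2,
        if p.1 + 1 < ((pre ++ suf).length : Int) then
          get (PySem.List.pyGetD (pre ++ suf) (p.1 + 1) "") else total))
      = zipNext get suf total := by
  induction suf generalizing pre with
  | nil => simp [PySem.List.enumerate_nil, zipNext]
  | cons s rest ih =>
    rw [PySem.List.enumerate_cons, List.map_cons]
    have htail : PySem.List.enumerate rest ((pre.length : Int) + 1)
        = PySem.List.enumerate rest (((pre ++ [s]).length : Int)) := by
      congr 1; simp
    have happ : (pre ++ [s]) ++ rest = pre ++ s :: rest := by simp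
    cases rest with
    | nil =>
      simp [zipNext]
    | cons t rest' =>
      have hidx : PySem.List.pyGetD (pre ++ s :: t :: rest') ((pre.length : Int) + 1) "" = t := by
        have : ((pre.length : Int) + 1) = ((pre.length + 1 : Nat) : Int) := by push_cast; ring

        rw [this, PySem.List.pyGetD_natCast]
        rw [List.getD_eq_getElem?_getD]
        rw [List.getElem?_append_right (by omega)]
        simp
      have hc : (pre.length : Int) + 1 < ((pre ++ s :: t :: rest').length : Int) := by
        simp
      have ih' := ih (pre ++ [s])
      rw [happ] at ih'
      rw [zipNext_cons]
      simp only [nextOf]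
      rw [htail, ih', if_pos hc, hidx]

theorem nodup_present (d : PySem.Dict String Int) :
    (SECTION_ORDER.filter (fun s => d.contains s)).Nodup :=
  List.Nodup.filter _ (by decide)

theorem split_ranges_spec : Claim_equal_split_ranges := by
  intro starts total _
  unfold Spec_split_ranges split_ranges split_ranges_alt
  set d : PySem.Dict String Int := PySem.Dict.mk starts with hd
  set present : List String := SECTION_ORDER.filter (fun s => d.contains s) with hp
  have hnodup : present.Nodup := nodup_present d
  -- A side
  rw [PySem.Dict.items_foldl_insert_fresh (PySem.List.enumerate present 0)
      (fun p => p.2)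
      (fun p => (d.getD p.2 0,
        if p.1 + 1 < (present.length : Int) then
          d.getD (PySem.List.pyGetD present (p.1 + 1) "") 0 else total))
      (PySem.Dict.mk [])
      (by intro a _; simp [PySem.Dict.contains_mk])
      (by rw [PySem.List.map_snd_enumerate]; exact hnodup)]
  have ha := a_core (fun s => d.getD s 0) [] present total
  simp only [List.nil_append, List.length_nil, Nat.cast_zero] at ha
  rw [ha]
  -- B side
  simp only [List.foldl_reverse]
  rw [← List.foldr_filter]
  rw [← hp]
  have hb := b_core (fun s => d.getD s 0) present total
  simp only [] at hb
  rw [hb]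
  simp only [List.reverse_reverse]
  unfold PySem.Dict.ofList PySem.Dict.update
  rw [PySem.Dict.items_foldl_insert_fresh (zipNext (fun s => d.getD s 0) present total)
      Prod.fst Prod.snd PySem.Dict.empty
      (by intro a _; simp [PySem.Dict.empty, PySem.Dict.contains_mk])
      (by rw [zipNext_keys]; exact hnodup)]
  simp [PySem.Dict.empty]
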